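-- pv_equiv track=rewrite | github.com/MJP1998/Auto_short_generator | src/video_generator.py | create_index_mapping
-- ===== SOURCE A (Python) =====
-- def create_index_mapping(cleaned_text, original_text):
--     mapping = {}
--     j = 0
--     for i in range(len(cleaned_text)):
--         while j < len(original_text) and original_text[j] != cleaned_text[i]:
--             j += 1
--         if j < len(original_text):
--             mapping[i] = j
--             j += 1
--     return mapping
-- ===== SOURCE B (Python) =====
-- def create_index_mapping(cleaned_text, original_text):
--     mapping = {}
--     i = 0
--     for j, ch in enumerate(original_text):
--         if i < len(cleaned_text) and cleaned_text[i] == ch: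
--             mapping[i] = j
--             i += 1
--     return mapping
-- ===== Notes on version B (the rewrite author's own statement) =====
-- stated objective: simpler
-- what changed: Replaced A's nested for-i/while-j scan (outer loop over cleaned_text with an inner catch-up scan over original_text) by a single flat pass over original_text with enumerate and one pointer into cleaned_text; the inner while loop disappears.
import Mathlib
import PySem

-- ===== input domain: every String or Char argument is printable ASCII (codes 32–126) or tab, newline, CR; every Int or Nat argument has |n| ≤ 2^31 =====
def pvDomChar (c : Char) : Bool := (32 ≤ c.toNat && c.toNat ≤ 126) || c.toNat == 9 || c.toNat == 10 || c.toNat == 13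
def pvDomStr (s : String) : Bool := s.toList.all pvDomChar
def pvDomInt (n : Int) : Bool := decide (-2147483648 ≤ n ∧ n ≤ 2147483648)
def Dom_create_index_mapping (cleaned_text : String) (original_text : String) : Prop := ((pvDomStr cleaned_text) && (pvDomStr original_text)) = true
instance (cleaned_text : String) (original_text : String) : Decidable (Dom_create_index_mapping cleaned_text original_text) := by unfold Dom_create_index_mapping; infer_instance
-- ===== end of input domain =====

-- B replaces A's nested for/while two-pointer scan by a single flat pass over the
-- original text driven by one pointer into the cleaned text (objective: simpler).

-- ===== PORT A =====
-- inner 'while j < len(original_text) and original_text[j] != cleaned_text[i]: j += 1'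
def pvAWhile (ol : List Char) (c : Char) (j : Nat) : Nat :=
  if h : j < ol.length then
    if ol.getD j ' ' ≠ c then pvAWhile ol c (j + 1) else j
  else j
termination_by ol.length - j

def create_index_mapping (cleaned_text : String) (original_text : String) : List (Int × Int) :=
  let cl := cleaned_text.toList
  let ol := original_text.toList
  -- state = (mapping, j); keys inserted are always fresh, so Dict insertion appends
  (((List.range cl.length).foldl
      (fun (s : PySem.Dict Int Int × Nat) i =>
        let j := pvAWhile ol (cl.getD i ' ') s.2
        if j < ol.length then (s.1.insert (i : Int) (j : Int), j + 1) else (s.1, j))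
      (PySem.Dict.empty, 0)).1).items

-- ===== PORT B =====
def create_index_mapping_alt (cleaned_text : String) (original_text : String) : List (Int × Int) :=
  let cl := cleaned_text.toList
  -- state = (mapping, i); one pass over enumerate(original_text)
  (((PySem.List.enumerate original_text.toList 0).foldl
      (fun (s : PySem.Dict Int Int × Nat) jc =>
        if s.2 < cl.length ∧ cl.getD s.2 ' ' = jc.2 then (s.1.insert (s.2 : Int) jc.1, s.2 + 1) else s)
      (PySem.Dict.empty, 0)).1).items

-- ===== PRECONDITION & SPEC =====
def Spec_create_index_mapping (cleaned_text : String) (original_text : String) (out : List (Int × Int)) : Prop := out = create_index_mapping_alt cleaned_text original_text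
instance (cleaned_text : String) (original_text : String) (out : List (Int × Int)) : Decidable (Spec_create_index_mapping cleaned_text original_text out) := by unfold Spec_create_index_mapping; infer_instance

-- ===== CLAIM (what is proved, stated in full; the proofs are below) =====
def Claim_equal_create_index_mapping : Prop := ∀ (cleaned_text : String) (original_text : String), Dom_create_index_mapping cleaned_text original_text → Spec_create_index_mapping cleaned_text original_text (create_index_mapping cleaned_text original_text)

-- ===== LEMMAS AND PROOFS =====

-- common greedy-match specification: pairs produced by the forward greedy match of
-- cl against ol, with absolute counters i (cleaned index) and j (original index)
def pvGMatch : List Char → List Char → Nat → Nat → List (Int × Int)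
  | [], _, _, _ => []
  | _ :: _, [], _, _ => []
  | c :: cs, o :: os, i, j =>
    if o = c then ((i : Int), (j : Int)) :: pvGMatch cs os (i + 1) (j + 1)
    else pvGMatch (c :: cs) os i (j + 1)
termination_by cl ol => cl.length + ol.length

lemma pvGMatch_nil (cl : List Char) (i j : Nat) : pvGMatch cl [] i j = [] := by
  cases cl <;> simp [pvGMatch]

-- number of characters the inner while loop skips
def pvSkip : List Char → Char → Nat
  | [], _ => 0
  | o :: os, c => if o = c then 0 else pvSkip os c + 1

lemma pvSkip_le (os : List Char) (c : Char) : pvSkip os c ≤ os.length := by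
  induction os with
  | nil => simp [pvSkip]
  | cons o os ih => simp only [pvSkip, List.length_cons]; split <;> omega

lemma pvAWhile_eq (ol : List Char) (c : Char) (j : Nat) :
    pvAWhile ol c j = j + pvSkip (ol.drop j) c := by
  by_cases h : j < ol.length
  · have hdrop : ol.drop j = ol[j] :: ol.drop (j + 1) := List.drop_eq_getElem_cons h
    rw [pvAWhile]
    simp only [dif_pos h, List.getD_eq_getElem ol ' ' h]
    by_cases hc : ol[j] = c
    · simp [hc, hdrop, pvSkip]
    · rw [if_pos hc, pvAWhile_eq ol c (j + 1), hdrop]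
      simp [pvSkip, hc]; omega
  · rw [pvAWhile]
    simp [dif_neg h, List.drop_eq_nil_of_le (le_of_not_gt h), pvSkip]
termination_by ol.length - j

lemma pvGMatch_cons (c : Char) (cs os : List Char) (i j : Nat) :
    pvGMatch (c :: cs) os i j =
      if pvSkip os c < os.length
      then ((i : Int), ((j + pvSkip os c : Nat) : Int)) ::
            pvGMatch cs (os.drop (pvSkip os c + 1)) (i + 1) (j + pvSkip os c + 1)
      else [] := by
  induction os generalizing j with
  | nil => simp [pvGMatch, pvSkip]
  | cons o os ih =>
    by_cases hc : o = c
    · simp [pvGMatch, pvSkip, hc]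
    · have h1 : pvSkip (o :: os) c = pvSkip os c + 1 := by simp [pvSkip, hc]
      rw [pvGMatch, if_neg hc, ih (j + 1), h1]
      have h2 : pvSkip os c + 1 < (o :: os).length ↔ pvSkip os c < os.length := by
        simp only [List.length_cons]; omega
      by_cases h : pvSkip os c < os.length
      · rw [if_pos h, if_pos (h2.mpr h)]
        have e1 : j + 1 + pvSkip os c = j + (pvSkip os c + 1) := by omega
        simp [List.drop_succ_cons, e1]
      · rw [if_neg h, if_neg (fun hh => h (h2.mp hh))]

-- Dict facts: inserting a key larger than all present keys appends
lemma pvItems_insert_fresh (d : PySem.Dict Int Int) (i : Nat) (v : Int)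
    (hf : ∀ k ∈ d.keys, k < (i : Int)) :
    (d.insert (i : Int) v).items = d.items ++ [((i : Int), v)] := by
  apply PySem.Dict.items_insert_of_not_contains
  rw [PySem.Dict.contains_eq_decide_mem_keys]
  simp only [decide_eq_false_iff_not]
  intro hmem
  exact absurd (hf _ hmem) (lt_irrefl _)

-- A's loop computes pvGMatch
lemma pvALoop (cl ol : List Char) (k : Nat) :
    ∀ (i j : Nat) (d : PySem.Dict Int Int), i + k = cl.length → j ≤ ol.length →
      (∀ key ∈ d.keys, key < (i : Int)) →
      (((List.range' i k).foldl
          (fun (s : PySem.Dict Int Int × Nat) i =>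
            let j := pvAWhile ol (cl.getD i ' ') s.2
            if j < ol.length then (s.1.insert (i : Int) (j : Int), j + 1) else (s.1, j))
          (d, j)).1).items
        = d.items ++ pvGMatch (cl.drop i) (ol.drop j) i j := by
  induction k with
  | zero =>
    intro i j d hi hj hf
    have : cl.drop i = [] := List.drop_eq_nil_of_le (by omega)
    simp [this, pvGMatch]
  | succ k ih =>
    intro i j d hi hj hf
    have hil : i < cl.length := by omega
    have hdropc : cl.drop i = cl[i] :: cl.drop (i + 1) := List.drop_eq_getElem_cons hil
    have hgetc : cl.getD i ' ' = cl[i] := List.getD_eq_getElem cl ' ' hil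
    rw [List.range'_succ, List.foldl_cons]
    simp only [hgetc, pvAWhile_eq ol cl[i] j]
    set sk := pvSkip (ol.drop j) cl[i] with hsk
    have hsk_le : sk ≤ ol.length - j := by
      have := pvSkip_le (ol.drop j) cl[i]
      simpa [List.length_drop] using this
    have hcond : j + sk < ol.length ↔ sk < (ol.drop j).length := by
      simp [List.length_drop]; omega
    by_cases h : j + sk < ol.length
    · rw [if_pos h]
      rw [ih (i + 1) (j + sk + 1) (d.insert (i : Int) ((j + sk : Nat) : Int)) (by omega) (by omega)
            (by intro key hk
                rcases (PySem.Dict.mem_keys_insert _ _ _ _).mp hk with h1 | h1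
                · rw [h1]; push_cast; omega
                · have := hf key h1; push_cast; omega)]
      · rw [pvItems_insert_fresh d i _ hf]
        rw [hdropc, pvGMatch_cons, if_pos (hcond.mp h)]
        have hdd : ol.drop (j + sk + 1) = (ol.drop j).drop (sk + 1) := by
          rw [List.drop_drop]; ring_nf
        rw [List.append_assoc]
        refine congrArg _ (congrArg _ ?_)
        rw [hdd]
    · rw [if_neg h]
      have hsk_eq : sk = (ol.drop j).length := by
        have := hcond; simp [List.length_drop] at this ⊢; omega
      have hjend : j + sk = ol.length := by simp [List.length_drop] at hsk_eq; omega
      rw [ih (i + 1) (j + sk) d (by omega) (by omega)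
            (fun key hk => lt_trans (hf key hk) (by push_cast; omega))]
      rw [List.drop_eq_nil_of_le (by omega : ol.length ≤ j + sk)]
      rw [pvGMatch_nil, hdropc, pvGMatch_cons, if_neg (fun hh => h (hcond.mpr hh))]

-- B's loop computes pvGMatch (structural on the enumerated suffix of the original text)
lemma pvBLoop (cl : List Char) (ol : List Char) :
    ∀ (i j : Nat) (d : PySem.Dict Int Int), (∀ key ∈ d.keys, key < (i : Int)) →
      (((PySem.List.enumerate ol (j : Int)).foldl
          (fun (s : PySem.Dict Int Int × Nat) jc =>
            if s.2 < cl.length ∧ cl.getD s.2 ' ' = jc.2 then (s.1.insert (s.2 : Int) jc.1, s.2 + 1) else s)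
          (d, i)).1).items
        = d.items ++ pvGMatch (cl.drop i) ol i j := by
  induction ol with
  | nil => intro i j d hf; simp [PySem.List.enumerate, pvGMatch_nil]
  | cons o os ih =>
    intro i j d hf
    rw [PySem.List.enumerate_cons, List.foldl_cons]
    by_cases hil : i < cl.length
    · have hdropc : cl.drop i = cl[i] :: cl.drop (i + 1) := List.drop_eq_getElem_cons hil
      have hgetc : cl.getD i ' ' = cl[i] := List.getD_eq_getElem cl ' ' hil
      by_cases hc : cl[i] = o
      · rw [if_pos ⟨hil, by rw [hgetc, hc]⟩]
        have : ((j : Int) + 1) = ((j + 1 : Nat) : Int) := by push_cast; ring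
        rw [this, ih (i + 1) (j + 1) (d.insert (i : Int) (j : Int))
              (by intro key hk
                  rcases (PySem.Dict.mem_keys_insert _ _ _ _).mp hk with h1 | h1
                  · push_cast; omega
                  · have := hf key h1; push_cast; omega)]
        rw [pvItems_insert_fresh d i _ hf, hdropc, pvGMatch, if_pos hc.symm]
        simp [List.append_assoc]
      · rw [if_neg (by rintro ⟨-, hh⟩; rw [hgetc] at hh; exact hc hh)]
        have : ((j : Int) + 1) = ((j + 1 : Nat) : Int) := by push_cast; ring
        rw [this, ih i (j + 1) d hf, hdropc, pvGMatch, if_neg (fun hh => hc hh.symm)]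
    · rw [if_neg (by rintro ⟨hh, -⟩; exact hil hh)]
      have : ((j : Int) + 1) = ((j + 1 : Nat) : Int) := by push_cast; ring
      have hnil : cl.drop i = [] := List.drop_eq_nil_of_le (by omega)
      rw [this, ih i (j + 1) d hf, hnil]
      simp [pvGMatch]

-- ===== VERDICT (by name: the statement is the Claim_ definition above) =====
theorem create_index_mapping_spec : Claim_equal_create_index_mapping := by
  intro cleaned_text original_text _
  unfold Spec_create_index_mapping create_index_mapping create_index_mapping_alt
  have ha := pvALoop cleaned_text.toList original_text.toList cleaned_text.toList.length
      0 0 PySem.Dict.empty (by omega) (by omega) (by simp [PySem.Dict.keys_empty])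
  have hb := pvBLoop cleaned_text.toList original_text.toList 0 0 PySem.Dict.empty
      (by simp [PySem.Dict.keys_empty])
  simp only [List.range_eq_range', Nat.cast_zero] at *
  rw [ha, hb]
  simp
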